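-- pv_equiv track=rewrite | github.com/okara83/Becoming-a-Data-Scientist | Data Science and Machine Learning/Machine-Learning-In-Python-THOROUGH/EXAMPLES/EDABIT/EXPERT/001_100/86_translate_from_human_to_programmer.py | replace_nums
-- ===== SOURCE A (Python) =====
-- def replace_nums(string):
--     n, result= "", ""
--     for i in string:
--         if i.isnumeric(): n += i
--         else:
--             if not n == "":
--                 result += bin(int(n))[2:]
--                 n = ""
--             result += i
--
--     if not n == "": result += bin(int(n))[2:]
--     return result
-- ===== SOURCE B (Python) =====
-- def replace_nums(string):
--     # Index-based run scanner: jump over each maximal digit run at once and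
--     # join the pieces, instead of A's per-character accumulator state machine.
--     out = []
--     i, n = 0, len(string)
--     while i < n:
--         if string[i].isnumeric():
--             j = i
--             while j < n and string[j].isnumeric():
--                 j += 1
--             out.append(bin(int(string[i:j]))[2:])
--             i = j
--         else:
--             out.append(string[i])
--             i += 1
--     return "".join(out)
-- ===== Notes on version B (the rewrite author's own statement) =====
-- stated objective: idiomatic
-- what changed: Replaced the per-character accumulator/flush state machine with an index-jumping run scanner that consumes each maximal digit run at once and joins the collected pieces.
import Mathlib
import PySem

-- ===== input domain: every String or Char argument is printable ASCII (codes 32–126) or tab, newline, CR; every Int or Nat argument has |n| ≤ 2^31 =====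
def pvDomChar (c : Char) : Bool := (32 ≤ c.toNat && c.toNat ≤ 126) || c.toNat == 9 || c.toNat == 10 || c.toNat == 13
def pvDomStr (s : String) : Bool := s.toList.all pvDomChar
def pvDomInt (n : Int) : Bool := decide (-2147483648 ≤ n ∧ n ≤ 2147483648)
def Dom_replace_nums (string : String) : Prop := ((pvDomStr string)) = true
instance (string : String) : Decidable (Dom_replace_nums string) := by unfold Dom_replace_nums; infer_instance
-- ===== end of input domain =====

-- B replaces A's per-character accumulator/flush state machine by an index-jumping
-- run scanner over maximal digit runs (objective: more idiomatic decomposition).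

-- ===== PORT A =====
-- bin(int(n))[2:] — n is always a nonempty run of ASCII digits, so int() never raises
-- and the value is nonnegative; the `.getD 0` default is unreachable.
-- PySem.Int.toBinChars = format(n,'b') = bin(n)[2:] for nonnegative n.
def pvBinRun (cs : List Char) : List Char :=
  PySem.Int.toBinChars ((PySem.Int.ofChars? cs).getD 0)

-- i.isnumeric() ported as PySem.Chars.isdigit: on the printable-ASCII domain they coincide.
def replace_nums (string : String) : String :=
  let step : (List Char × List Char) → Char → (List Char × List Char) := fun (n, result) i =>
    if PySem.Chars.isdigit i then (n ++ [i], result)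
    else if n ≠ [] then ([], (result ++ pvBinRun n) ++ [i])
    else (n, result ++ [i])
  let p := string.toList.foldl step ([], [])
  String.mk (if p.1 ≠ [] then p.2 ++ pvBinRun p.1 else p.2)

-- ===== PORT B =====
-- The inner `while j < n and string[j].isnumeric(): j += 1` advance of Source B is the
-- takeWhile/dropWhile split of the maximal digit run; `"".join(out)` is the concatenation.
def pvGoAlt : List Char → List Char
  | [] => []
  | c :: cs =>
    if h : PySem.Chars.isdigit c then
      pvBinRun ((c :: cs).takeWhile PySem.Chars.isdigit)
        ++ pvGoAlt ((c :: cs).dropWhile PySem.Chars.isdigit)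
    else c :: pvGoAlt cs
termination_by cs => cs.length
decreasing_by
  · simp [h]
    exact List.length_dropWhile_le _ _
  · simp

def replace_nums_alt (string : String) : String := String.mk (pvGoAlt string.toList)

-- ===== PRECONDITION & SPEC =====
def Spec_replace_nums (string : String) (out : String) : Prop := out = replace_nums_alt string
instance (string : String) (out : String) : Decidable (Spec_replace_nums string out) := by unfold Spec_replace_nums; infer_instance

-- ===== CLAIM (what is proved, stated in full; the proofs are below) =====
def Claim_equal_replace_nums : Prop := ∀ (string : String), Dom_replace_nums string → Spec_replace_nums string (replace_nums string)

-- ===== LEMMAS AND PROOFS =====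

theorem pvGoAlt_cons_pos {c : Char} {cs : List Char} (h : PySem.Chars.isdigit c) :
    pvGoAlt (c :: cs) = pvBinRun (c :: cs.takeWhile PySem.Chars.isdigit)
      ++ pvGoAlt (cs.dropWhile PySem.Chars.isdigit) := by
  rw [pvGoAlt]; simp [h]

theorem pvGoAlt_cons_neg {c : Char} {cs : List Char} (h : ¬ PySem.Chars.isdigit c) :
    pvGoAlt (c :: cs) = c :: pvGoAlt cs := by
  rw [pvGoAlt]; simp [h]

-- A's fold step and final flush, named for the invariant lemma.
def pvStepA : (List Char × List Char) → Char → (List Char × List Char) := fun (n, result) i =>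
  if PySem.Chars.isdigit i then (n ++ [i], result)
  else if n ≠ [] then ([], (result ++ pvBinRun n) ++ [i])
  else (n, result ++ [i])

def pvFlushA : List Char × List Char → List Char := fun p =>
  if p.1 ≠ [] then p.2 ++ pvBinRun p.1 else p.2

-- Invariant: flushing A's fold equals the already-emitted output plus B's scanner,
-- where a nonempty pending digit accumulator n merges with the digit run B is about to read.
theorem pvInv (cs : List Char) :
    (∀ r, pvFlushA (cs.foldl pvStepA ([], r)) = r ++ pvGoAlt cs) ∧
    (∀ n r, n ≠ [] →
      pvFlushA (cs.foldl pvStepA (n, r)) =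
        (r ++ pvBinRun (n ++ cs.takeWhile PySem.Chars.isdigit))
          ++ pvGoAlt (cs.dropWhile PySem.Chars.isdigit)) := by
  induction cs with
  | nil =>
    constructor
    · intro r; simp [pvFlushA, pvGoAlt]
    · intro n r hn; simp [pvFlushA, pvGoAlt, hn]
  | cons c cs ih =>
    obtain ⟨ih1, ih2⟩ := ih
    constructor
    · intro r
      by_cases h : PySem.Chars.isdigit c
      · have e : pvStepA ([], r) c = ([c], r) := by simp [pvStepA, h]
        rw [List.foldl_cons, e, ih2 [c] r (by simp), pvGoAlt_cons_pos h]
        simp [List.append_assoc]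
      · have e : pvStepA ([], r) c = ([], r ++ [c]) := by simp [pvStepA, h]
        rw [List.foldl_cons, e, ih1 (r ++ [c]), pvGoAlt_cons_neg h]
        simp
    · intro n r hn
      by_cases h : PySem.Chars.isdigit c
      · have e : pvStepA (n, r) c = (n ++ [c], r) := by simp [pvStepA, h]
        rw [List.foldl_cons, e, ih2 (n ++ [c]) r (by simp)]
        simp [List.takeWhile_cons, List.dropWhile_cons, h, List.append_assoc]
      · have e : pvStepA (n, r) c = ([], (r ++ pvBinRun n) ++ [c]) := by
          simp [pvStepA, h, hn]
        rw [List.foldl_cons, e, ih1 ((r ++ pvBinRun n) ++ [c])]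
        simp [h, List.takeWhile_cons, List.dropWhile_cons, pvGoAlt_cons_neg h,
          List.append_assoc]

-- ===== VERDICT (by name: the statement is the Claim_ definition above) =====
theorem replace_nums_spec : Claim_equal_replace_nums := by
  intro s _
  show replace_nums s = replace_nums_alt s
  unfold replace_nums replace_nums_alt
  rw [show (fun (p : List Char × List Char) (i : Char) =>
        if PySem.Chars.isdigit i then (p.1 ++ [i], p.2)
        else if p.1 ≠ [] then (([] : List Char), (p.2 ++ pvBinRun p.1) ++ [i])
        else (p.1, p.2 ++ [i])) = pvStepA from rfl]
  exact congrArg String.mk ((pvInv s.toList).1 [])
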